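-- pv_equiv track=rewrite | github.com/MarineRoboticsGroup/lcgp | experimental_py/snl/estimate_snl.py | ConvertTrajsIntoConfigList
-- ===== SOURCE A (Python) =====
-- import copy
--
-- def ConvertTrajsIntoConfigList(trajs):
--     trajIndex = [-1 for traj in trajs]
--     finalTrajIndex = [len(traj)-1 for traj in trajs]
--     config_list = []
--     move = []
--     while not (trajIndex == finalTrajIndex):
--         move.clear()
--         for robotIndex in range(len(trajs)):
--             # Increment trajectory for unfinished paths
--             if trajIndex[robotIndex] != finalTrajIndex[robotIndex]:
--                 trajIndex[robotIndex] += 1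
--             # Get next step on paths
--             newLoc = trajs[robotIndex][trajIndex[robotIndex]]
--             # move += tuple(newLoc)
--             move.append(tuple(newLoc))
--         move_copy = copy.deepcopy(move)
--         config_list.append(move_copy)
--     return config_list
-- ===== SOURCE B (Python) =====
-- def ConvertTrajsIntoConfigList(trajs):
--     maxlen = max((len(t) for t in trajs), default=0)
--     return [[tuple(t[min(step, len(t) - 1)]) for t in trajs]
--             for step in range(maxlen)]
-- ===== Notes on version B (the rewrite author's own statement) =====
-- stated objective: idiomatic
-- what changed: B replaces A's mutable per-robot index vector and equality-based while loop with a closed-form comprehension: each timestep's configuration reads trajs[r][min(step, len(t)-1)] directly for step in range(max length).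
import Mathlib
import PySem

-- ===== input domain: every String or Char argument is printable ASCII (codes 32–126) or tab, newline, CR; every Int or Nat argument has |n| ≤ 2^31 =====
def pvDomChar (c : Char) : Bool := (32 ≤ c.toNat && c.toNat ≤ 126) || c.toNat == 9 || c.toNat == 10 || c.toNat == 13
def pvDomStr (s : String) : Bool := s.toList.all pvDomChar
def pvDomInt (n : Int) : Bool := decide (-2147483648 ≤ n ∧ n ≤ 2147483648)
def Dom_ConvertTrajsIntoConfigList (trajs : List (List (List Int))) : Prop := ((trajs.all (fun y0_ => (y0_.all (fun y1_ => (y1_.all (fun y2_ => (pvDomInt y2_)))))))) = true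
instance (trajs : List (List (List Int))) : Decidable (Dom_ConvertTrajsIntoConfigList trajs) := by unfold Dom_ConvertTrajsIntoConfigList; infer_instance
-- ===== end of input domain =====

-- B replaces A's mutable index vector and while-until-equal loop by a closed-form
-- per-timestep comprehension with a clamped index (idiomatic; same cost).

-- ===== PORT A =====
-- one pass of A's inner 'for robotIndex in range(len(trajs))' loop: each iteration
-- touches only its own robot's index, so it is transcribed as a map over the zipped
-- (traj, (trajIndex, finalTrajIndex)) triples, in the same order with the same values
def pvInnerStep (trajs : List (List (List Int))) (ti fi : List Int) :
    List Int × List (List Int) :=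
  let pairs := (trajs.zip (ti.zip fi)).map (fun p =>
    let tiR' := if p.2.1 ≠ p.2.2 then p.2.1 + 1 else p.2.1
    (tiR', PySem.List.pyGetD p.1 tiR' []))
  (pairs.map Prod.fst, pairs.map Prod.snd)

-- A's outer while loop; the fuel argument only makes the recursion total (Python has
-- no fuel); inside Pre_ the loop always stops via the ti = fi test first
def pvLoopA (fuel : Nat) (trajs : List (List (List Int))) (ti fi : List Int) :
    List (List (List Int)) :=
  match fuel with
  | 0 => []
  | fuel + 1 =>
    if ti = fi then []
    else
      let s := pvInnerStep trajs ti fi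
      s.2 :: pvLoopA fuel trajs s.1 fi

def ConvertTrajsIntoConfigList (trajs : List (List (List Int))) : List (List (List Int)) :=
  let ti := trajs.map (fun _ => (-1 : Int))
  let fi := trajs.map (fun t => (t.length : Int) - 1)
  pvLoopA ((trajs.map List.length).foldl max 0 + 1) trajs ti fi

-- ===== PORT B =====
def ConvertTrajsIntoConfigList_alt (trajs : List (List (List Int))) : List (List (List Int)) :=
  let maxlen := (trajs.map List.length).foldl max 0
  (List.range maxlen).map (fun (step : Nat) =>
    trajs.map (fun t => PySem.List.pyGetD t (min (step : Int) ((t.length : Int) - 1)) []))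

-- ===== PRECONDITION & SPEC =====
-- Pre_ excludes exactly the inputs on which A raises IndexError (an empty trajectory
-- alongside a nonempty one); B raises IndexError there too.
def Pre_ConvertTrajsIntoConfigList (trajs : List (List (List Int))) : Prop :=
  (∀ t ∈ trajs, t = []) ∨ (∀ t ∈ trajs, t ≠ [])
instance (trajs : List (List (List Int))) : Decidable (Pre_ConvertTrajsIntoConfigList trajs) := by
  unfold Pre_ConvertTrajsIntoConfigList; infer_instance

def pvWitness_ConvertTrajsIntoConfigList : List (List (List Int)) :=
  [[[0, 0], [1, 0]], [[5, 5]]]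

def Spec_ConvertTrajsIntoConfigList (trajs : List (List (List Int))) (out : List (List (List Int))) : Prop := out = ConvertTrajsIntoConfigList_alt trajs
instance (trajs : List (List (List Int))) (out : List (List (List Int))) : Decidable (Spec_ConvertTrajsIntoConfigList trajs out) := by unfold Spec_ConvertTrajsIntoConfigList; infer_instance

-- ===== CLAIM (what is proved, stated in full; the proofs are below) =====
def Claim_equal_ConvertTrajsIntoConfigList : Prop := ∀ (trajs : List (List (List Int))), Dom_ConvertTrajsIntoConfigList trajs → Pre_ConvertTrajsIntoConfigList trajs → Spec_ConvertTrajsIntoConfigList trajs (ConvertTrajsIntoConfigList trajs)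

-- ===== LEMMAS AND PROOFS =====

-- the shape of trajIndex after s completed iterations of A's loop (all trajs nonempty)
def pvTiS (trajs : List (List (List Int))) (s : Nat) : List Int :=
  trajs.map (fun t => min (s : Int) (t.length : Int) - 1)

def pvFi (trajs : List (List (List Int))) : List Int :=
  trajs.map (fun t => (t.length : Int) - 1)

def pvRow (trajs : List (List (List Int))) (s : Nat) : List (List Int) :=
  trajs.map (fun t => PySem.List.pyGetD t (min (s : Int) ((t.length : Int) - 1)) [])

theorem pvInnerStep_eq (trajs : List (List (List Int))) (s : Nat)
    (h : ∀ t ∈ trajs, t ≠ []) :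
    pvInnerStep trajs (pvTiS trajs s) (pvFi trajs) = (pvTiS trajs (s + 1), pvRow trajs s) := by
  induction trajs with
  | nil => rfl
  | cons t ts ih =>
    have ht : t ≠ [] := h t (by simp)
    have hlen : 1 ≤ (t.length : Int) := by
      have : t.length ≠ 0 := by simpa [List.length_eq_zero_iff] using ht
      omega
    have ihs := ih (fun u hu => h u (by simp [hu]))
    simp only [pvInnerStep, pvTiS, pvFi, pvRow, List.map_cons, List.zip_cons_cons,
      Prod.mk.injEq, List.cons.injEq] at ihs ⊢
    obtain ⟨ih1, ih2⟩ := ihs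
    push_cast at ih1 ⊢
    have hif : (if min (s : Int) (t.length : Int) - 1 ≠ (t.length : Int) - 1
          then min (s : Int) (t.length : Int) - 1 + 1
          else min (s : Int) (t.length : Int) - 1)
        = min (s : Int) ((t.length : Int) - 1) := by
      split_ifs with hc <;> omega
    rw [hif]
    exact ⟨⟨by omega, ih1⟩, rfl, ih2⟩

-- exit test: trajIndex = finalTrajIndex after s iterations iff every length ≤ s
theorem pvTiS_eq_fi_iff (trajs : List (List (List Int))) (s : Nat) :
    pvTiS trajs s = pvFi trajs ↔ ∀ t ∈ trajs, t.length ≤ s := by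
  unfold pvTiS pvFi
  rw [List.map_eq_map_iff]
  constructor
  · intro h t ht
    have := h t ht
    omega
  · intro h t ht
    have := h t ht
    omega

theorem pv_le_foldl_max (l : List Nat) (a : Nat) : a ≤ l.foldl max a := by
  induction l generalizing a with
  | nil => simp
  | cons x xs ih => exact le_trans (le_max_left a x) (ih _)

theorem pv_foldl_max_le (l : List Nat) (a s : Nat) (ha : a ≤ s)
    (h : ∀ x ∈ l, x ≤ s) : l.foldl max a ≤ s := by
  induction l generalizing a with
  | nil => simpa
  | cons x xs ih =>
    exact ih _ (max_le ha (h x (by simp))) (fun y hy => h y (by simp [hy]))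

theorem pv_mem_le_foldl_max (l : List Nat) (a x : Nat) (hx : x ∈ l) :
    x ≤ l.foldl max a := by
  induction l generalizing a with
  | nil => cases hx
  | cons y ys ih =>
    rcases List.mem_cons.mp hx with h | h
    · subst h; exact le_trans (le_max_right a x) (pv_le_foldl_max ys _)
    · exact ih _ h

-- main loop characterisation (all trajs nonempty)
theorem pvLoopA_eq (trajs : List (List (List Int))) (h : ∀ t ∈ trajs, t ≠ [])
    (fuel s : Nat) (hf : (trajs.map List.length).foldl max 0 - s ≤ fuel) :
    pvLoopA fuel trajs (pvTiS trajs s) (pvFi trajs)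
      = (List.range' s ((trajs.map List.length).foldl max 0 - s)).map (pvRow trajs) := by
  induction fuel generalizing s with
  | zero =>
    have : (trajs.map List.length).foldl max 0 - s = 0 := by omega
    simp [pvLoopA, this]
  | succ fuel ih =>
    by_cases hstop : (trajs.map List.length).foldl max 0 ≤ s
    · have hall : ∀ t ∈ trajs, t.length ≤ s := by
        intro t ht
        exact le_trans (pv_mem_le_foldl_max _ 0 _ (List.mem_map_of_mem ht)) hstop
      have heq : pvTiS trajs s = pvFi trajs := (pvTiS_eq_fi_iff trajs s).mpr hall
      have h0 : (trajs.map List.length).foldl max 0 - s = 0 := by omega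
      simp [pvLoopA, heq, h0]
    · have hne : pvTiS trajs s ≠ pvFi trajs := by
        intro heq
        exact hstop (pv_foldl_max_le _ 0 s (by omega)
          (by
            intro x hx
            rcases List.mem_map.mp hx with ⟨t, ht, rfl⟩
            exact (pvTiS_eq_fi_iff trajs s).mp heq t ht))
      rw [pvLoopA]
      simp only [hne, if_false]
      rw [pvInnerStep_eq trajs s h]
      have hrange : (trajs.map List.length).foldl max 0 - s
          = ((trajs.map List.length).foldl max 0 - (s + 1)) + 1 := by omega
      rw [ih (s + 1) (by omega), hrange, List.range'_succ]
      simp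

-- ===== VERDICT (by name: the statement is the Claim_ definition above) =====
theorem ConvertTrajsIntoConfigList_spec : Claim_equal_ConvertTrajsIntoConfigList := by
  intro trajs _ hpre
  unfold Spec_ConvertTrajsIntoConfigList
  rcases hpre with hall | hne
  · -- every trajectory empty: both sides are []
    have hfi : trajs.map (fun t => ((t.length : Int) - 1)) = trajs.map (fun _ => (-1 : Int)) := by
      rw [List.map_eq_map_iff]
      intro t ht
      simp [hall t ht]
    have hmax : (trajs.map List.length).foldl max 0 = 0 := by
      apply Nat.le_antisymm _ (Nat.zero_le _)
      apply pv_foldl_max_le _ 0 0 le_rfl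
      intro x hx
      rcases List.mem_map.mp hx with ⟨t, ht, rfl⟩
      simp [hall t ht]
    simp [ConvertTrajsIntoConfigList, ConvertTrajsIntoConfigList_alt, pvLoopA, hfi, hmax]
  · -- every trajectory nonempty: apply the loop characterisation at s = 0
    have hti0 : trajs.map (fun _ => (-1 : Int)) = pvTiS trajs 0 := by
      unfold pvTiS
      rw [List.map_eq_map_iff]
      intro t ht
      have : (0 : Int) ≤ (t.length : Int) := by positivity
      omega
    have := pvLoopA_eq trajs hne ((trajs.map List.length).foldl max 0 + 1) 0 (by omega)
    simp only [Nat.sub_zero] at this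
    unfold ConvertTrajsIntoConfigList ConvertTrajsIntoConfigList_alt
    rw [hti0]
    show pvLoopA _ trajs (pvTiS trajs 0) (pvFi trajs) = _
    rw [this, ← List.range_eq_range']
    simp [pvRow]
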